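-- pv_equiv track=rewrite | github.com/seiya/fautodiff | fautodiff/code_tree.py | _find_inline_comment
-- ===== SOURCE A (Python) =====
-- from typing import (
--     Any,
--     ClassVar,
--     Dict,
--     Iterable,
--     Iterator,
--     List,
--     Optional,
--     Pattern,
--     Set,
--     Tuple,
--     Union,
-- )
--
-- def _find_inline_comment(text: str) -> Optional[int]:
--     """Return the index of an inline ``!`` comment in ``text`` if present."""
--
--     in_single = False
--     in_double = False
--     idx = 0
--     length = len(text)
--     while idx < length:
--         ch = text[idx]
--         if ch == "'" and not in_double:
--             if idx + 1 < length and text[idx + 1] == "'":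
--                 idx += 2
--                 continue
--             in_single = not in_single
--         elif ch == '"' and not in_single:
--             if idx + 1 < length and text[idx + 1] == '"':
--                 idx += 2
--                 continue
--             in_double = not in_double
--         elif ch == "!" and not in_single and not in_double:
--             return idx
--         idx += 1
--     return None
-- ===== SOURCE B (Python) =====
-- def _skip_string(text, q, i, n):
--     """Skip past a q-quoted string starting after its opening quote at i-1.
--     Doubled q counts as an escaped quote. Return the index just past the
--     closing quote, or None if the string is unterminated."""
--     while i < n:
--         if text[i] == q:
--             if i + 1 < n and text[i + 1] == q:
--                 i += 2
--             else:
--                 return i + 1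
--         else:
--             i += 1
--     return None
--
--
-- def _find_inline_comment(text):
--     """Return the index of an inline ``!`` comment in ``text`` if present."""
--     i, n = 0, len(text)
--     while i < n:
--         c = text[i]
--         if c == "!":
--             return i
--         if c == "'" or c == '"':
--             j = _skip_string(text, c, i + 1, n)
--             if j is None:
--                 return None
--             i = j
--         else:
--             i += 1
--     return None
-- ===== Notes on version B (the rewrite author's own statement) =====
-- stated objective: simpler
-- what changed: Replaces A's single loop carrying two in_single/in_double state booleans with lookahead by a plain scan that, on meeting a quote, delegates the whole quoted region (with doubled-quote escapes) to a dedicated skip-string helper, and otherwise just looks for the comment bang.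
import Mathlib
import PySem

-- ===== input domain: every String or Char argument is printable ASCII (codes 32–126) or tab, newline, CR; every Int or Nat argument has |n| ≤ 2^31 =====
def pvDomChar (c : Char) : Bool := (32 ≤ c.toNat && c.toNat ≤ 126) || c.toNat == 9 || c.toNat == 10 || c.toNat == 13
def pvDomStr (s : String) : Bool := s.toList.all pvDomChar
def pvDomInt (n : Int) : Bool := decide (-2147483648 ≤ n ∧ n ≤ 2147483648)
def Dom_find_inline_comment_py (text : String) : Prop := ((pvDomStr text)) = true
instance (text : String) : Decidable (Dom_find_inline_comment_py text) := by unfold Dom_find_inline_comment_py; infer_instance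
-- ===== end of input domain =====

-- B replaces A's two-boolean state machine by a plain scan that hands each quoted
-- region to a dedicated skip-string helper (objective: simpler).

-- ===== PORT A =====
-- A's while loop over indices, transliterated as structural recursion on the
-- remaining characters with the running index idx and the two state booleans.
def pvLoopA : List Char → Int → Bool → Bool → Option Int
  | [], _, _, _ => none
  | ch :: rest, idx, ins, ind =>
    if ch = '\'' && !ind then
      match rest with
      | c2 :: rest2 =>
        if c2 = '\'' then pvLoopA rest2 (idx + 2) ins ind
        else pvLoopA (c2 :: rest2) (idx + 1) (!ins) ind
      | [] => pvLoopA [] (idx + 1) (!ins) ind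
    else if ch = '"' && !ins then
      match rest with
      | c2 :: rest2 =>
        if c2 = '"' then pvLoopA rest2 (idx + 2) ins ind
        else pvLoopA (c2 :: rest2) (idx + 1) ins (!ind)
      | [] => pvLoopA [] (idx + 1) ins (!ind)
    else if ch = '!' && !ins && !ind then some idx
    else pvLoopA rest (idx + 1) ins ind
termination_by l _ _ _ => l.length
decreasing_by all_goals simp

def find_inline_comment_py (text : String) : Option Int :=
  pvLoopA text.toList 0 false false

-- ===== PORT B =====
-- _skip_string: the remaining characters stand in for the index pair (i, n);
-- it returns the suffix just past the closing quote together with its index.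
def pvSkipB (q : Char) : List Char → Int → Option (List Char × Int)
  | [], _ => none
  | c :: rest, i =>
    if c = q then
      match rest with
      | c2 :: rest2 =>
        if c2 = q then pvSkipB q rest2 (i + 2)
        else some (rest, i + 1)
      | [] => some ([], i + 1)
    else pvSkipB q rest (i + 1)

-- needed by pvMainB's termination proof
theorem pvSkipB_length (q : Char) (l : List Char) (i : Int) (l' : List Char) (i' : Int)
    (h : pvSkipB q l i = some (l', i')) : l'.length ≤ l.length := by
  fun_induction pvSkipB q l i generalizing l' i'
  all_goals first
    | (simp [pvSkipB] at h; done)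
    | (rename_i ih; have := ih _ _ h; simp at this ⊢; omega)
    | (simp at h; obtain ⟨h1, h2⟩ := h; subst_vars; simp)

def pvMainB : List Char → Int → Option Int
  | [], _ => none
  | c :: rest, i =>
    if c = '!' then some i
    else if c = '\'' || c = '"' then
      match h : pvSkipB c rest (i + 1) with
      | none => none
      | some (l', i') => pvMainB l' i'
    else pvMainB rest (i + 1)
termination_by l => l.length
decreasing_by
  · have := pvSkipB_length c rest (i + 1) l' i' h; simp; omega
  · simp

def find_inline_comment_py_alt (text : String) : Option Int :=
  pvMainB text.toList 0

-- ===== PRECONDITION & SPEC =====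
def Spec_find_inline_comment_py (text : String) (out : Option Int) : Prop := out = find_inline_comment_py_alt text
instance (text : String) (out : Option Int) : Decidable (Spec_find_inline_comment_py text out) := by unfold Spec_find_inline_comment_py; infer_instance

-- ===== CLAIM (what is proved, stated in full; the proofs are below) =====
def Claim_equal_find_inline_comment_py : Prop := ∀ (text : String), Dom_find_inline_comment_py text → Spec_find_inline_comment_py text (find_inline_comment_py text)

-- ===== LEMMAS AND PROOFS =====

-- Simultaneous characterisation of A's three reachable states:
-- outside strings A's loop is B's main scan; inside a q-string it is B's skip
-- helper followed by the main scan.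
-- pvMainB on a cons, with the dependent match replaced by a plain match
theorem pvMainB_cons (c : Char) (rest : List Char) (i : Int) :
    pvMainB (c :: rest) i =
      if c = '!' then some i
      else if c = '\'' || c = '"' then
        (match pvSkipB c rest (i + 1) with
         | none => none
         | some (l', i') => pvMainB l' i')
      else pvMainB rest (i + 1) := by
  by_cases h1 : c = '!'
  · subst h1; rw [pvMainB.eq_def]; simp
  · by_cases h2 : (c = '\'' || c = '"') = true
    · rw [pvMainB.eq_def]; simp [h1, h2]
      split <;> rename_i heq <;> simp [heq]
    · rw [pvMainB.eq_def]; simp [h1, h2]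

-- an immediately doubled opening quote is a no-op for B's scan
theorem pv_escape (q : Char) (hq : q = '\'' ∨ q = '"') (l : List Char) (i : Int) :
    (match pvSkipB q (q :: l) i with
     | none => none
     | some (l', i') => pvMainB l' i') = pvMainB l (i + 1) := by
  have hbq : ¬ q = '!' := by rcases hq with h | h <;> simp [h]
  have hor : (q = '\'' || q = '"') = true := by rcases hq with h | h <;> simp [h]
  match l with
  | [] => rw [pvSkipB.eq_def]; simp [pvMainB]
  | c2 :: r2 =>
    by_cases h2 : c2 = q
    · rw [pvSkipB.eq_def]; simp [h2]
      rw [pvMainB_cons]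
      simp [hbq, hor]
      have harith : i + 1 + 1 = i + 2 := by ring
      rw [harith]
    · rw [pvSkipB.eq_def]; simp [h2]

theorem pv_key : ∀ (n : ℕ) (l : List Char), l.length ≤ n → ∀ (idx : Int),
    (pvLoopA l idx false false = pvMainB l idx) ∧
    (pvLoopA l idx true false =
      (match pvSkipB '\'' l idx with
       | none => none
       | some (l', i') => pvMainB l' i')) ∧
    (pvLoopA l idx false true =
      (match pvSkipB '"' l idx with
       | none => none
       | some (l', i') => pvMainB l' i')) := by
  intro n
  induction n with
  | zero =>
    intro l hl idx
    have hnil : l = [] := by cases l <;> simp_all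
    subst hnil
    simp [pvLoopA, pvMainB, pvSkipB]
  | succ n ih =>
    intro l hl idx
    match l with
    | [] => simp [pvLoopA, pvMainB, pvSkipB]
    | c :: rest =>
      have hr : rest.length ≤ n := by simp at hl; omega
      refine ⟨?_, ?_, ?_⟩
      · -- state (false, false): outside any string
        by_cases hq : c = '\''
        · subst hq
          rw [pvMainB_cons]; simp
          match rest with
          | [] => simp [pvLoopA, pvSkipB, pvMainB]
          | c2 :: rest2 =>
            have hr2 : rest2.length ≤ n := by simp at hl; omega
            by_cases h2 : c2 = '\''
            · subst h2
              rw [pvLoopA]; simp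
              rw [pv_escape '\'' (Or.inl rfl) rest2 (idx + 1)]
              have harith : idx + 1 + 1 = idx + 2 := by ring
              rw [harith]
              exact (ih _ hr2 (idx + 2)).1
            · rw [pvLoopA]; simp [h2]
              exact (ih _ hr (idx + 1)).2.1
        · by_cases hq2 : c = '"'
          · subst hq2
            rw [pvMainB_cons]; simp
            match rest with
            | [] => simp [pvLoopA, pvSkipB, pvMainB]
            | c2 :: rest2 =>
              have hr2 : rest2.length ≤ n := by simp at hl; omega
              by_cases h2 : c2 = '"'
              · subst h2
                rw [pvLoopA]; simp
                rw [pv_escape '"' (Or.inr rfl) rest2 (idx + 1)]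
                have harith : idx + 1 + 1 = idx + 2 := by ring
                rw [harith]
                exact (ih _ hr2 (idx + 2)).1
              · rw [pvLoopA]; simp [h2]
                exact (ih _ hr (idx + 1)).2.2
          · by_cases hb : c = '!'
            · subst hb; rw [pvMainB_cons]; rw [pvLoopA.eq_def]; simp
            · rw [pvMainB_cons]; rw [pvLoopA.eq_def]; simp [hq, hq2, hb]
              exact (ih _ hr (idx + 1)).1
      · -- state (true, false): inside a single-quoted string
        by_cases hq : c = '\''
        · subst hq
          match rest with
          | [] => simp [pvLoopA, pvSkipB, pvMainB]
          | c2 :: rest2 =>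
            have hr2 : rest2.length ≤ n := by simp at hl; omega
            by_cases h2 : c2 = '\''
            · subst h2
              rw [pvLoopA]; rw [pvSkipB.eq_def]; simp
              exact (ih _ hr2 (idx + 2)).2.1
            · rw [pvLoopA]; rw [pvSkipB.eq_def]; simp [h2]
              exact (ih _ hr (idx + 1)).1
        · rw [pvLoopA.eq_def]; rw [pvSkipB.eq_def]; simp [hq]
          exact (ih _ hr (idx + 1)).2.1
      · -- state (false, true): inside a double-quoted string
        by_cases hq : c = '"'
        · subst hq
          match rest with
          | [] => simp [pvLoopA, pvSkipB, pvMainB]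
          | c2 :: rest2 =>
            have hr2 : rest2.length ≤ n := by simp at hl; omega
            by_cases h2 : c2 = '"'
            · subst h2
              rw [pvLoopA]; rw [pvSkipB.eq_def]; simp
              exact (ih _ hr2 (idx + 2)).2.2
            · rw [pvLoopA]; rw [pvSkipB.eq_def]; simp [h2]
              exact (ih _ hr (idx + 1)).1
        · rw [pvLoopA.eq_def]; rw [pvSkipB.eq_def]; simp [hq]
          exact (ih _ hr (idx + 1)).2.2

-- ===== VERDICT (by name: the statement is the Claim_ definition above) =====
theorem find_inline_comment_py_spec : Claim_equal_find_inline_comment_py := by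
  intro text _
  unfold Spec_find_inline_comment_py find_inline_comment_py find_inline_comment_py_alt
  exact (pv_key text.toList.length text.toList le_rfl 0).1
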